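-- pv_equiv track=rewrite | github.com/liboo0731/code_algo | palindrome/palindrome.py | func
-- ===== SOURCE A (Python) =====
-- def func(s: str):
--     dict_count = dict()
--     for x in s:
--         if x in dict_count:
--             dict_count[x] += 1
--         else:
--             dict_count[x] = 1
--
--     # dict_count_ji = {k: v for k, v in dict_count.items() if v % 2 == 1}
--     # count_ji = len(dict_count_ji)
--     # 判断是否可以组成回文串时，如果奇数字符的数量大于1，则不行
--     # count_ji = len([x for x in dict_count.values() if x % 2 == 1])
--
--     # 记录回文左半边子串
--     res_left = ""
--     for c, count in sorted(dict_count.items()):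
--         # 如果要使用所有字符数量，这里只去偶数字符
--         # 将数量大于1的字符分配
--         res_left += c * (count // 2)
--     # 中间放一个数量为奇数的字符
--     res_mid = ""
--     # 如果要使用所有字符数量，这里去奇数数量最大的直接放中间
--     # 逆序，把大的放前边
--     for c, count in sorted(dict_count.items(), reverse=True):
--         if count % 2 == 1:
--             res_mid += c
--             break
--     res = res_left + res_mid + res_left[::-1]
--
--     return res  # abcefzzfzzfecba
-- ===== SOURCE B (Python) =====
-- def func(s: str):
--     # No counting at all: sort once, then consume the sorted characters in
--     # adjacent pairs; each matched pair contributes one char to the left half,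
--     # each unpaired (leftover) char overwrites the middle, so the middle ends
--     # as the largest character with an odd count.
--     t = sorted(s)
--     n = len(t)
--     left = []
--     mid = ""
--     i = 0
--     while i < n:
--         if i + 1 < n and t[i] == t[i + 1]:
--             left.append(t[i])
--             i += 2
--         else:
--             mid = t[i]
--             i += 1
--     half = "".join(left)
--     return half + mid + half[::-1]
-- ===== Notes on version B (the rewrite author's own statement) =====
-- stated objective: alternative
-- what changed: B keeps no character counts at all: it sorts the string once and consumes it in a single pair-matching scan (two equal adjacent chars -> one char of the left half; an unpaired char overwrites the middle, so the last leftover is the largest odd-count char), replacing A's count dictionary and its two item sorts.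
import Mathlib
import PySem

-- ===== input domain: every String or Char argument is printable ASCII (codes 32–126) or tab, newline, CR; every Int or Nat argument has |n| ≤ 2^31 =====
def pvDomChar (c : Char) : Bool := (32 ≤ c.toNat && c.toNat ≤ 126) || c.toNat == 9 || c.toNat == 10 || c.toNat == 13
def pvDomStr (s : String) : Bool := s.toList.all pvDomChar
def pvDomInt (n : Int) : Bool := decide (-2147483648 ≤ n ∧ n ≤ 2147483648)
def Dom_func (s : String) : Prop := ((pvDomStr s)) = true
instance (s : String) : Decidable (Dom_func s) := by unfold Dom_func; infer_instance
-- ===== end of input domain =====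

-- B keeps no character counts: it sorts once and pair-consumes the sorted characters,
-- replacing A's count dictionary and its two item sorts (objective: alternative).

-- ===== PORT A =====
-- "for c, count in sorted(items, reverse=True): if count % 2 == 1: res_mid += c; break"
def funcMidLoop : List (Char × Int) → List Char
  | [] => []
  | p :: t => if PySem.Int.mod p.2 2 == 1 then [p.1] else funcMidLoop t

def func (s : String) : String :=
  -- the counting loop: dict_count[x] += 1 / dict_count[x] = 1
  let dict_count := s.toList.foldl
    (fun d x => if d.contains x then d.insert x (d.getD x 0 + 1) else d.insert x 1)
    PySem.Dict.empty
  -- sorted(dict_count.items()) compares (key, value) pairs; the keys are distinct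
  -- (Dict keys are unique), so sorting by the key alone is exact here.
  -- c * (count // 2): count ≥ 1 in the dict, so count // 2 ≥ 0 and toNat is exact.
  let res_left := (PySem.List.sorted dict_count.items (fun p => p.1)).foldl
    (fun acc p => acc ++ List.replicate (PySem.Int.floordiv p.2 2).toNat p.1) []
  let res_mid := funcMidLoop (PySem.List.sorted dict_count.items (fun p => p.1) true)
  -- res_left + res_mid + res_left[::-1]  (s[::-1] = reverse)
  String.ofList (res_left ++ res_mid ++ res_left.reverse)

-- ===== PORT B =====
-- the while loop over the sorted characters: a matched adjacent pair extends `left`,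
-- an unpaired character overwrites `mid`; i / i+1 rendered as structural recursion.
def funcLoop : List Char → List Char → List Char → List Char × List Char
  | a :: b :: rest, left, mid =>
      if a = b then funcLoop rest (left ++ [a]) mid else funcLoop (b :: rest) left [a]
  | [a], left, _mid => (left, [a])
  | [], left, mid => (left, mid)

def func_alt (s : String) : String :=
  let t := PySem.List.sorted s.toList (fun c => c)
  match funcLoop t [] [] with
  | (left, mid) => String.ofList (left ++ mid ++ left.reverse)

-- ===== PRECONDITION & SPEC =====
def Spec_func (s : String) (out : String) : Prop := out = func_alt s
instance (s : String) (out : String) : Decidable (Spec_func s out) := by unfold Spec_func; infer_instance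

-- ===== CLAIM (what is proved, stated in full; the proofs are below) =====
def Claim_equal_func : Prop := ∀ (s : String), Dom_func s → Spec_func s (func s)

-- ===== LEMMAS AND PROOFS =====

-- `replicate (f k) k` for each key k, in key order: the common normal form of both sides
def pvRep (f : Char → Nat) (K : List Char) : List Char :=
  K.flatMap (fun k => List.replicate (f k) k)

theorem ofList_sublist {α : Type} [BEq α] [LawfulBEq α] (xs : List α) :
    List.Sublist (PySem.Set.ofList xs) xs := by
  induction xs with
  | nil => exact List.nil_sublist _
  | cons x t ih =>
    rw [PySem.Set.ofList_cons]
    exact List.Sublist.cons₂ x (List.Sublist.trans List.filter_sublist ih)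

theorem ofList_pairwise_lt_of_sorted {α : Type} [LinearOrder α] [BEq α] [LawfulBEq α]
    (xs : List α) (h : xs.Pairwise (· ≤ ·)) :
    (PySem.Set.ofList xs).Pairwise (· < ·) := by
  have hle : (PySem.Set.ofList xs).Pairwise (· ≤ ·) := h.sublist (ofList_sublist xs)
  have hne : (PySem.Set.ofList xs).Pairwise (· ≠ ·) := PySem.Set.nodup_ofList xs
  exact (hle.and hne).imp (fun h => lt_of_le_of_ne h.1 h.2)

theorem mem_pvRep (f : Char → Nat) (K : List Char) (a : Char) (h : a ∈ pvRep f K) : a ∈ K := by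
  rcases List.mem_flatMap.1 h with ⟨k, hk, ha⟩
  rw [List.eq_of_mem_replicate ha]
  exact hk

theorem pairwise_replicate_le (n : Nat) (a : Char) :
    (List.replicate n a).Pairwise (· ≤ ·) := by
  induction n with
  | zero => simp
  | succ m ih =>
    rw [List.replicate_succ]
    exact List.Pairwise.cons (fun y hy => (List.eq_of_mem_replicate hy) ▸ le_refl a) ih

theorem pairwise_pvRep (f : Char → Nat) (K : List Char) (hK : K.Pairwise (· < ·)) :
    (pvRep f K).Pairwise (· ≤ ·) := by
  induction K with
  | nil => simp [pvRep]
  | cons k K' ih =>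
    show (List.replicate (f k) k ++ pvRep f K').Pairwise (· ≤ ·)
    rw [List.pairwise_append]
    refine ⟨pairwise_replicate_le _ _, ih hK.tail, ?_⟩
    intro x hx y hy
    rw [List.eq_of_mem_replicate hx]
    exact le_of_lt (List.rel_of_pairwise_cons hK (mem_pvRep f K' y hy))

theorem count_pvRep (f : Char → Nat) (K : List Char) (hnd : K.Nodup) (a : Char) :
    (pvRep f K).count a = if a ∈ K then f a else 0 := by
  induction K with
  | nil => simp [pvRep]
  | cons k K' ih =>
    have h : (pvRep f (k :: K')).count a
        = (List.replicate (f k) k).count a + (pvRep f K').count a := by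
      show ((List.replicate (f k) k) ++ pvRep f K').count a = _
      exact List.count_append ..
    rw [h, List.count_replicate, ih hnd.of_cons]
    by_cases hak : a = k
    · subst hak
      have : a ∉ K' := (List.nodup_cons.1 hnd).1
      simp [this]
    · simp only [List.mem_cons]
      have hb : (k == a) = false := beq_eq_false_iff_ne.mpr (fun h => hak h.symm)
      simp [hb, hak]

-- a sorted character list is the concatenation of its runs, keys in increasing order
theorem sorted_eq_pvRep (cs : List Char) :
    PySem.List.sorted cs (fun c => c)
      = pvRep (fun k => cs.count k)
          (PySem.Set.ofList (PySem.List.sorted cs (fun c => c))) := by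
  set t := PySem.List.sorted cs (fun c => c) with ht
  set K := PySem.Set.ofList t with hK
  have hKnd : K.Nodup := PySem.Set.nodup_ofList t
  have hperm : (pvRep (fun k => cs.count k) K).Perm cs := by
    rw [List.perm_iff_count]
    intro a
    rw [count_pvRep _ _ hKnd]
    by_cases ha : a ∈ cs
    · have : a ∈ K := by
        rw [hK, PySem.Set.mem_ofList, ht, PySem.List.mem_sorted]
        exact ha
      simp [this]
    · have : a ∉ K := by
        rw [hK, PySem.Set.mem_ofList, ht, PySem.List.mem_sorted]
        exact ha
      simp [this, List.count_eq_zero.2 ha]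
  have hsorted : (pvRep (fun k => cs.count k) K).Pairwise (· ≤ ·) :=
    pairwise_pvRep _ _ (ofList_pairwise_lt_of_sorted t (PySem.List.sorted_pairwise cs (fun c => c)))
  exact PySem.List.sorted_id_eq_of_perm_of_pairwise cs (pvRep (fun k => cs.count k) K) hperm hsorted

-- consuming one run: n copies of c followed by rest whose head (if any) differs from c
theorem funcLoop_run (c : Char) : ∀ (n : Nat) (rest left mid : List Char),
    (∀ r, rest.head? = some r → c ≠ r) →
    funcLoop (List.replicate n c ++ rest) left mid
      = funcLoop rest (left ++ List.replicate (n / 2) c) (if n % 2 = 1 then [c] else mid) := by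
  intro n
  induction n using Nat.strong_induction_on with
  | _ n ih =>
    match n with
    | 0 => intro rest left mid _; simp
    | 1 =>
      intro rest left mid h
      cases rest with
      | nil => simp [funcLoop]
      | cons r rs =>
        have hcr : c ≠ r := h r rfl
        simp [funcLoop, hcr]
    | (m + 2) =>
      intro rest left mid h
      have hrepl : List.replicate (m + 2) c ++ rest
          = c :: c :: (List.replicate m c ++ rest) := by
        simp [List.replicate_succ]
      rw [hrepl]
      show funcLoop (c :: c :: (List.replicate m c ++ rest)) left mid = _
      rw [show funcLoop (c :: c :: (List.replicate m c ++ rest)) left mid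
          = funcLoop (List.replicate m c ++ rest) (left ++ [c]) mid by simp [funcLoop]]
      rw [ih m (by omega) rest (left ++ [c]) mid h]
      have h2 : (m + 2) / 2 = m / 2 + 1 := by omega
      have h3 : (m + 2) % 2 = m % 2 := by omega
      rw [h2, h3, List.append_assoc]
      congr 2

theorem getLast?_cons_eq (a : Char) (l : List Char) :
    (a :: l).getLast? = (match l.getLast? with | some c => some c | none => some a) := by
  cases l with
  | nil => simp
  | cons b t =>
    rw [List.getLast?_cons_cons]
    have hne : (b :: t) ≠ [] := by simp
    rw [List.getLast?_eq_some_getLast hne]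

-- the pair-consumption loop on a run-structured list
theorem funcLoop_pvRep (f : Char → Nat) : ∀ (K : List Char), K.Pairwise (· < ·) →
    (∀ k ∈ K, 1 ≤ f k) → ∀ (left mid : List Char),
    funcLoop (pvRep f K) left mid
      = (left ++ pvRep (fun k => f k / 2) K,
         match (K.filter (fun k => f k % 2 == 1)).getLast? with
         | some c => [c] | none => mid) := by
  intro K
  induction K with
  | nil => intro _ _ left mid; simp [pvRep, funcLoop]
  | cons k K' ih =>
    intro hK hf left mid
    have hhead : ∀ r, (pvRep f K').head? = some r → k ≠ r := by
      intro r hr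
      have hrmem : r ∈ pvRep f K' := List.mem_of_mem_head? hr
      exact ne_of_lt (List.rel_of_pairwise_cons hK (mem_pvRep f K' r hrmem))
    have h1 : pvRep f (k :: K') = List.replicate (f k) k ++ pvRep f K' := rfl
    rw [h1, funcLoop_run k (f k) (pvRep f K') left mid hhead,
      ih hK.tail (fun x hx => hf x (List.mem_cons_of_mem k hx))]
    rw [Prod.mk.injEq]
    constructor
    · show left ++ List.replicate (f k / 2) k ++ pvRep (fun k => f k / 2) K'
          = left ++ pvRep (fun k => f k / 2) (k :: K')
      rw [List.append_assoc]
      rfl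
    · rw [List.filter_cons]
      by_cases hodd : f k % 2 = 1
      · have hb : (f k % 2 == 1) = true := by simp [hodd]
        rw [if_pos hodd, if_pos hb, getLast?_cons_eq]
        cases hl : (K'.filter (fun k => f k % 2 == 1)).getLast? <;> simp
      · have hb : ¬ ((f k % 2 == 1) = true) := by simp [hodd]
        rw [if_neg hodd, if_neg hb]

-- ===== lemmas for the A side =====

theorem sorted_items_eq (cs : List Char) :
    PySem.List.sorted (PySem.Dict.counter cs).items (fun p => p.1)
      = (PySem.Set.ofList (PySem.List.sorted cs (fun c => c))).map
          (fun k => (k, (cs.count k : Int))) := by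
  set t := PySem.List.sorted cs (fun c => c) with ht
  apply PySem.List.sorted_eq_of_perm_of_pairwise_lt
  · rw [PySem.Dict.items_counter]
    apply List.Perm.map
    rw [List.perm_ext_iff_of_nodup (PySem.Set.nodup_ofList _) (PySem.Set.nodup_ofList _)]
    intro a
    rw [PySem.Set.mem_ofList, PySem.Set.mem_ofList, ht, PySem.List.mem_sorted]
  · exact List.Pairwise.map _ (fun a b h => h)
      (ofList_pairwise_lt_of_sorted t (PySem.List.sorted_pairwise cs (fun c => c)))

theorem sorted_items_rev_eq (cs : List Char) :
    PySem.List.sorted (PySem.Dict.counter cs).items (fun p => p.1) true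
      = ((PySem.Set.ofList (PySem.List.sorted cs (fun c => c))).map
          (fun k => (k, (cs.count k : Int)))).reverse := by
  have h := sorted_items_eq cs
  apply PySem.List.sorted_rev_eq_of_perm_of_pairwise_gt
  · exact (List.reverse_perm _).trans
      (h ▸ PySem.List.sorted_perm (PySem.Dict.counter cs).items (fun p => p.1) false)
  · rw [List.pairwise_reverse]
    exact List.Pairwise.map _ (fun a b h => h)
      (ofList_pairwise_lt_of_sorted _ (PySem.List.sorted_pairwise cs (fun c => c)))

theorem midLoop_reverse_eq (L : List (Char × Int)) :
    funcMidLoop L.reverse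
      = (match ((L.filter (fun p => PySem.Int.mod p.2 2 == 1)).map (fun p => p.1)).getLast? with
         | some c => [c]
         | none => []) := by
  induction L using List.reverseRecOn with
  | nil => rfl
  | append_singleton l p ih =>
    rw [List.reverse_append, List.reverse_singleton, List.singleton_append, List.filter_append]
    show (if (PySem.Int.mod p.2 2 == 1) = true then [p.1] else funcMidLoop l.reverse) = _
    by_cases hp : (PySem.Int.mod p.2 2 == 1) = true
    · have hfil : List.filter (fun q => PySem.Int.mod q.2 2 == 1) [p] = [p] := by
        rw [List.filter_cons, if_pos hp, List.filter_nil]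
      rw [if_pos hp, hfil, List.map_append, List.map_singleton, List.getLast?_concat]
    · have hfil : List.filter (fun q => PySem.Int.mod q.2 2 == 1) [p] = [] := by
        rw [List.filter_cons, if_neg hp, List.filter_nil]
      rw [if_neg hp, hfil, List.append_nil, ih]

theorem fdiv2_cast (m : Nat) : (PySem.Int.floordiv (m : Int) 2).toNat = m / 2 := by
  have h : PySem.Int.floordiv (m : Int) 2 = ((m / 2 : Nat) : Int) := by
    exact_mod_cast PySem.Int.floordiv_natCast m 2
  rw [h]
  exact Int.toNat_natCast _

theorem mod2_cast (m : Nat) : (PySem.Int.mod (m : Int) 2 == 1) = (m % 2 == 1) := by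
  have h : PySem.Int.mod (m : Int) 2 = ((m % 2 : Nat) : Int) := by
    exact_mod_cast PySem.Int.mod_natCast m 2
  rw [h]
  rcases Nat.mod_two_eq_zero_or_one m with h2 | h2 <;> rw [h2] <;> decide

-- ===== VERDICT (by name: the statement is the Claim_ definition above) =====
theorem func_spec : Claim_equal_func := by
  intro s _
  unfold Spec_func func func_alt
  set cs := s.toList with hcs
  set t := PySem.List.sorted cs (fun c => c) with ht
  set K := PySem.Set.ofList t with hK
  have hdict : cs.foldl
      (fun d x => if d.contains x then d.insert x (d.getD x 0 + 1) else d.insert x 1)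
      PySem.Dict.empty = PySem.Dict.counter cs := by
    rw [← PySem.Dict.foldl_insert_getD_add_one_eq_counter]
    congr 1
    funext d x
    by_cases h : d.contains x = true
    · rw [if_pos h]
    · rw [if_neg h, PySem.Dict.getD_of_not_contains d 0 (by simpa using h)]
      norm_num
  -- A's left half
  have hleft : (PySem.List.sorted (PySem.Dict.counter cs).items (fun p => p.1)).foldl
      (fun acc p => acc ++ List.replicate (PySem.Int.floordiv p.2 2).toNat p.1) []
      = pvRep (fun k => cs.count k / 2) K := by
    rw [PySem.List.foldl_append_eq_flatMap, List.nil_append, sorted_items_eq]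
    simp only [List.flatMap_def, List.map_map, ← ht, ← hK]
    show ((K.map (fun k => List.replicate (PySem.Int.floordiv ((cs.count k : Int)) 2).toNat k))).flatten = _
    rw [show (fun k => List.replicate (PySem.Int.floordiv ((cs.count k : Int)) 2).toNat k)
        = (fun k => List.replicate (cs.count k / 2) k) from funext fun k => by rw [fdiv2_cast]]
    rfl
  -- A's middle
  have hmid : funcMidLoop (PySem.List.sorted (PySem.Dict.counter cs).items (fun p => p.1) true)
      = (match (K.filter (fun k => cs.count k % 2 == 1)).getLast? with
         | some c => [c] | none => ([] : List Char)) := by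
    rw [sorted_items_rev_eq, midLoop_reverse_eq, List.filter_map]
    rw [List.map_map, ← ht, ← hK]
    have hcomp : (fun k => PySem.Int.mod (k, (cs.count k : Int)).2 2 == 1)
        = (fun k => cs.count k % 2 == 1) := funext fun k => mod2_cast (cs.count k)
    have hfst : ((fun p : Char × Int => p.1) ∘ fun k => (k, (cs.count k : Int))) = id := rfl
    rw [show ((fun p : Char × Int => PySem.Int.mod p.2 2 == 1) ∘ fun k => (k, (cs.count k : Int)))
        = (fun k => cs.count k % 2 == 1) from hcomp, hfst, List.map_id]
  -- B's loop
  have hB : funcLoop t [] []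
      = (pvRep (fun k => cs.count k / 2) K,
         match (K.filter (fun k => cs.count k % 2 == 1)).getLast? with
         | some c => [c] | none => ([] : List Char)) := by
    have hKpw : K.Pairwise (· < ·) :=
      ofList_pairwise_lt_of_sorted t (PySem.List.sorted_pairwise cs (fun c => c))
    have hf : ∀ k ∈ K, 1 ≤ cs.count k := by
      intro k hk
      have : k ∈ cs := by
        rw [hK, PySem.Set.mem_ofList, ht, PySem.List.mem_sorted] at hk
        exact hk
      exact List.count_pos_iff.2 this
    calc funcLoop t [] []
        = funcLoop (pvRep (fun k => cs.count k) K) [] [] := by rw [ht, sorted_eq_pvRep, ← ht, ← hK]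
      _ = _ := by rw [funcLoop_pvRep _ K hKpw hf [] []]; rfl
  simp only [hdict, hleft, hmid, hB]
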